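-- pv_equiv track=rewrite | github.com/Ceiphos/bomberman_rl | helper.py | dangerous_position
-- ===== SOURCE A (Python) =====
-- def addPosition(a, b):
--     """Adds tuples a and b elementwise and returns a new tuple with the result
--
--     Parameters
--     ----------
--     a : tuple (2dim)
--     b : tuple (2dim)
--
--     Returns
--     -------
--     tuple (2dim)
--     """
--     return (a[0] + b[0], a[1] + b[1])
--
-- def dangerous_position(position, bombs):
--     """Calculates a danger score for the position by the given bombs
--
--     The score is between 0 and 4 with 0 meaning no danger and 4 death in the next step
--
--     Parameters
--     ----------
--     position : 2dim tuple
--     bombs: List of 2dim tuple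
--
--     Returns
--     -------
--     in_danger : bool
--     danger_score : int
--     """
--     # score between 0 and 4, 0 for no danger, 4 for death in next step
--     danger_score = 0
--     directions = (
--         (0, -1), (0, -2), (0, -3),
--         (0, 1), (0, 2), (0, 3),
--         (-1, 0), (-2, 0), (-3, 0),
--         (1, 0), (2, 0), (3, 0)
--     )
--     in_danger = False
--     for (pos, t) in bombs:
--         if pos == position:
--             in_danger = True
--             danger_score = max(danger_score, 4 - t)  # t is between 0 and 3
--         for dir in directions:
--             danger_coord = addPosition(pos, dir)
--             if (danger_coord == position):
--                 danger_score = max(danger_score, 4 - t)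
--                 in_danger = True
--                 continue
--     return in_danger, danger_score
-- ===== SOURCE B (Python) =====
-- def dangerous_position(position, bombs):
--     in_danger = False
--     danger_score = 0
--     for (pos, t) in bombs:
--         dx = position[0] - pos[0]
--         dy = position[1] - pos[1]
--         if (dx == 0 and abs(dy) <= 3) or (dy == 0 and abs(dx) <= 3):
--             in_danger = True
--             danger_score = max(danger_score, 4 - t)
--     return in_danger, danger_score
-- ===== Notes on version B (the rewrite author's own statement) =====
-- stated objective: simpler
-- what changed: Replaces the 12-element direction-offset inner loop (plus the separate pos==position branch) by a single arithmetic same-row/same-column-within-3 test per bomb, removing the inner loop entirely.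
import Mathlib
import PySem

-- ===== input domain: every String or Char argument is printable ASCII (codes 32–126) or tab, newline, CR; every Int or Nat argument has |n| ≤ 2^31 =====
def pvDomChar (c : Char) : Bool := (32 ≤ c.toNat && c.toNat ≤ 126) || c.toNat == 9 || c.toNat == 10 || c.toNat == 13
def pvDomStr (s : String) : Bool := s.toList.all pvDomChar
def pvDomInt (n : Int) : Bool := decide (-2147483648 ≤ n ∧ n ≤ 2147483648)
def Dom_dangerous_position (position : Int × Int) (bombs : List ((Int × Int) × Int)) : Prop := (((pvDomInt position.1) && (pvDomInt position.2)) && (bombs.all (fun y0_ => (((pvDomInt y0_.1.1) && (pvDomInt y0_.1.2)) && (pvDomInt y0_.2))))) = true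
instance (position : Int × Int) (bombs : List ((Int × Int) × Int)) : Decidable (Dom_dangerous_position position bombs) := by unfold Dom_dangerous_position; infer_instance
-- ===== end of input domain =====

-- ===== PORT A =====
-- B replaces A's 12-offset inner loop by one arithmetic same-row/column test per bomb (simpler).
def addPosition (a b : Int × Int) : Int × Int := (a.1 + b.1, a.2 + b.2)

def pvDirections : List (Int × Int) :=
  [(0, -1), (0, -2), (0, -3), (0, 1), (0, 2), (0, 3),
   (-1, 0), (-2, 0), (-3, 0), (1, 0), (2, 0), (3, 0)]

def pvStepA (position : Int × Int) (st : Bool × Int) (b : (Int × Int) × Int) : Bool × Int :=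
  let pos := b.1
  let t := b.2
  let st1 := if pos = position then (true, max st.2 (4 - t)) else st
  pvDirections.foldl
    (fun s dir => if addPosition pos dir = position then (true, max s.2 (4 - t)) else s) st1

def dangerous_position (position : Int × Int) (bombs : List ((Int × Int) × Int)) : Bool × Int :=
  bombs.foldl (pvStepA position) (false, 0)

-- ===== PORT B =====
def pvStepB (position : Int × Int) (st : Bool × Int) (b : (Int × Int) × Int) : Bool × Int :=
  let dx := position.1 - b.1.1
  let dy := position.2 - b.1.2
  if (dx = 0 ∧ |dy| ≤ 3) ∨ (dy = 0 ∧ |dx| ≤ 3) then (true, max st.2 (4 - b.2)) else st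

def dangerous_position_alt (position : Int × Int) (bombs : List ((Int × Int) × Int)) : Bool × Int :=
  bombs.foldl (pvStepB position) (false, 0)

-- ===== PRECONDITION & SPEC =====
def Spec_dangerous_position (position : Int × Int) (bombs : List ((Int × Int) × Int)) (out : Bool × Int) : Prop := out = dangerous_position_alt position bombs
instance (position : Int × Int) (bombs : List ((Int × Int) × Int)) (out : Bool × Int) : Decidable (Spec_dangerous_position position bombs out) := by unfold Spec_dangerous_position; infer_instance

-- ===== CLAIM (what is proved, stated in full; the proofs are below) =====
def Claim_equal_dangerous_position : Prop := ∀ (position : Int × Int) (bombs : List ((Int × Int) × Int)), Dom_dangerous_position position bombs → Spec_dangerous_position position bombs (dangerous_position position bombs)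


-- ===== LEMMAS AND PROOFS =====
theorem pvFold_mark {α : Type} (P : α → Prop) [DecidablePred P] (v : Int) :
    ∀ (L : List α) (st : Bool × Int),
      L.foldl (fun s dir => if P dir then (true, max s.2 v) else s) st
        = if ∃ d ∈ L, P d then (true, max st.2 v) else st := by
  intro L
  induction L with
  | nil => intro st; simp
  | cons a L ih =>
      intro st
      by_cases h : P a
      · simp only [List.foldl_cons, if_pos h, ih]
        simp [h]
      · simp [List.foldl_cons, h, ih]

theorem pvCross_iff (px py bx qy : Int) :
    ((bx, qy) = (px, py) ∨ ∃ d ∈ pvDirections, addPosition (bx, qy) d = (px, py)) ↔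
      ((px - bx = 0 ∧ |py - qy| ≤ 3) ∨ (py - qy = 0 ∧ |px - bx| ≤ 3)) := by
  simp only [pvDirections, addPosition, List.mem_cons, List.not_mem_nil, or_false,
    Prod.mk.injEq, abs_le]
  constructor
  · rintro (⟨h1, h2⟩ | ⟨d, hd, h1, h2⟩)
    · omega
    · rcases hd with h | h | h | h | h | h | h | h | h | h | h | h <;> subst h <;>
        simp_all <;> omega
  · rintro (⟨h1, h2⟩ | ⟨h1, h2⟩)
    · rcases eq_or_ne qy py with h | h
      · exact Or.inl ⟨by omega, h⟩
      · refine Or.inr ?_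
        rcases (by omega : py - qy = 1 ∨ py - qy = 2 ∨ py - qy = 3 ∨
            py - qy = -1 ∨ py - qy = -2 ∨ py - qy = -3) with h3 | h3 | h3 | h3 | h3 | h3
        · exact ⟨(0, 1), by simp, by simp; omega⟩
        · exact ⟨(0, 2), by simp, by simp; omega⟩
        · exact ⟨(0, 3), by simp, by simp; omega⟩
        · exact ⟨(0, -1), by simp, by simp; omega⟩
        · exact ⟨(0, -2), by simp, by simp; omega⟩
        · exact ⟨(0, -3), by simp, by simp; omega⟩
    · rcases eq_or_ne bx px with h | h
      · exact Or.inl ⟨h, by omega⟩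
      · refine Or.inr ?_
        rcases (by omega : px - bx = 1 ∨ px - bx = 2 ∨ px - bx = 3 ∨
            px - bx = -1 ∨ px - bx = -2 ∨ px - bx = -3) with h3 | h3 | h3 | h3 | h3 | h3
        · exact ⟨(1, 0), by simp, by simp; omega⟩
        · exact ⟨(2, 0), by simp, by simp; omega⟩
        · exact ⟨(3, 0), by simp, by simp; omega⟩
        · exact ⟨(-1, 0), by simp, by simp; omega⟩
        · exact ⟨(-2, 0), by simp, by simp; omega⟩
        · exact ⟨(-3, 0), by simp, by simp; omega⟩

theorem pvStep_eq (position : Int × Int) (st : Bool × Int) (b : (Int × Int) × Int) :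
    pvStepA position st b = pvStepB position st b := by
  obtain ⟨⟨bx, qy⟩, t⟩ := b
  obtain ⟨px, py⟩ := position
  have hiff := pvCross_iff px py bx qy
  simp only [pvStepA, pvStepB]
  rw [pvFold_mark (fun dir => addPosition (bx, qy) dir = (px, py)) (4 - t) pvDirections]
  by_cases hc : (px - bx = 0 ∧ |py - qy| ≤ 3) ∨ (py - qy = 0 ∧ |px - bx| ≤ 3)
  · rw [if_pos hc]
    rcases hiff.mpr hc with h1 | h2
    · rw [if_pos h1]
      by_cases h2 : ∃ d ∈ pvDirections, addPosition (bx, qy) d = (px, py)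
      · rw [if_pos h2]; simp
      · rw [if_neg h2]
    · rw [if_pos h2]
      by_cases h1 : ((bx, qy) : Int × Int) = (px, py)
      · rw [if_pos h1]; simp
      · rw [if_neg h1]
  · have h1 : ¬(((bx, qy) : Int × Int) = (px, py)) := fun h => hc (hiff.mp (Or.inl h))
    have h2 : ¬(∃ d ∈ pvDirections, addPosition (bx, qy) d = (px, py)) :=
      fun h => hc (hiff.mp (Or.inr h))
    rw [if_neg h2, if_neg h1, if_neg hc]

theorem pvFoldAB (position : Int × Int) :
    ∀ (L : List ((Int × Int) × Int)) (st : Bool × Int),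
      L.foldl (pvStepA position) st = L.foldl (pvStepB position) st := by
  intro L
  induction L with
  | nil => intro st; rfl
  | cons b L ih => intro st; simp only [List.foldl_cons, pvStep_eq, ih]

-- ===== VERDICT (by name: the statement is the Claim_ definition above) =====
theorem dangerous_position_spec : Claim_equal_dangerous_position := by
  intro position bombs _
  unfold Spec_dangerous_position dangerous_position dangerous_position_alt
  exact pvFoldAB position bombs (false, 0)
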